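-- pv_equiv track=rewrite | github.com/IgnacioMonge/SpecTalkZX | tools/ikkle_squeeze.py | op_name
-- ===== SOURCE A (Python) =====
-- def op_name(oi):
--     if oi < 6: return f"S{oi}"
--     oi2 = oi - 6
--     if oi2 < 15:
--         pairs = [(i,j) for i in range(6) for j in range(i+1,6)]
--         return f"{pairs[oi2][0]}|{pairs[oi2][1]}"
--     oi3 = oi2 - 15
--     pairs = [(i,j) for i in range(6) for j in range(i+1,6)]
--     return f"{pairs[oi3][0]}&{pairs[oi3][1]}"
-- ===== SOURCE B (Python) =====
-- def op_name(oi):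
--     if oi < 6:
--         return f"S{oi}"
--     k = oi - 6
--     sep = "|" if k < 15 else "&"
--     if k >= 15:
--         k -= 15
--     i = 0
--     for row in range(5, 0, -1):
--         if k < row:
--             break
--         k -= row
--         i += 1
--     return f"{i}{sep}{i + 1 + k}"
-- ===== Notes on version B (the rewrite author's own statement) =====
-- stated objective: simpler
-- what changed: Replaces A's per-call pairs-list comprehension plus list indexing with pure arithmetic: a row-descent loop (row lengths 5,4,3,2,1) recovers the pair (i, j) directly from the index, so no pairs list is ever built.
import Mathlib
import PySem

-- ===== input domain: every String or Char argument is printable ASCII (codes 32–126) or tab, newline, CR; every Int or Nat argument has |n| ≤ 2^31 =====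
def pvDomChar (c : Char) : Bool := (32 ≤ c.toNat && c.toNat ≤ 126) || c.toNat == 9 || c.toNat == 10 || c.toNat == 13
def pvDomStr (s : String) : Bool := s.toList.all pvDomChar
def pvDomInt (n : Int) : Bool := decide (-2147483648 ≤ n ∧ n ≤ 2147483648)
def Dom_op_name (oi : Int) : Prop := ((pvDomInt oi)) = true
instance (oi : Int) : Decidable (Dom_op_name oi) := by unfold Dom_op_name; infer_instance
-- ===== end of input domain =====

-- B replaces A's pairs-list construction and indexing with pure arithmetic: a
-- row-descent loop recovers (i, j) directly from the index (objective: simpler).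

-- ===== PORT A =====
def op_name (oi : Int) : String :=
  if oi < 6 then "S" ++ PySem.Int.toStr oi
  else
    let oi2 := oi - 6
    if oi2 < 15 then
      let pairs := (PySem.List.pyRange 0 6 1).flatMap
        (fun i => (PySem.List.pyRange (i + 1) 6 1).map (fun j => (i, j)))
      match PySem.List.pyGet? pairs oi2 with
      | some p => PySem.Int.toStr p.1 ++ "|" ++ PySem.Int.toStr p.2
      | none => ""  -- unreachable: IndexError excluded by Pre_
    else
      let oi3 := oi2 - 15
      let pairs := (PySem.List.pyRange 0 6 1).flatMap
        (fun i => (PySem.List.pyRange (i + 1) 6 1).map (fun j => (i, j)))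
      match PySem.List.pyGet? pairs oi3 with
      | some p => PySem.Int.toStr p.1 ++ "&" ++ PySem.Int.toStr p.2
      | none => ""  -- unreachable: IndexError excluded by Pre_

-- ===== PORT B =====
-- the 'for row in range(5,0,-1): if k < row: break; k -= row; i += 1' loop of Source B
def pvRowDescent : List Int → Int → Int → Int × Int
  | [], k, i => (k, i)
  | row :: rest, k, i =>
      if k < row then (k, i) else pvRowDescent rest (k - row) (i + 1)

def op_name_alt (oi : Int) : String :=
  if oi < 6 then "S" ++ PySem.Int.toStr oi
  else
    let k := oi - 6
    let sep := if k < 15 then "|" else "&"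
    let k := if k ≥ 15 then k - 15 else k
    let (k, i) := pvRowDescent (PySem.List.pyRange 5 0 (-1)) k 0
    PySem.Int.toStr i ++ sep ++ PySem.Int.toStr (i + 1 + k)

-- ===== PRECONDITION & SPEC =====
-- Pre_ excludes oi ≥ 36, where Python A raises IndexError.
def Pre_op_name (oi : Int) : Prop := oi < 36
instance (oi : Int) : Decidable (Pre_op_name oi) := by unfold Pre_op_name; infer_instance
def pvWitness_op_name : Int := (10)
def Spec_op_name (oi : Int) (out : String) : Prop := out = op_name_alt oi
instance (oi : Int) (out : String) : Decidable (Spec_op_name oi out) := by unfold Spec_op_name; infer_instance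

-- ===== CLAIM (what is proved, stated in full; the proofs are below) =====
def Claim_equal_op_name : Prop := ∀ (oi : Int), Dom_op_name oi → Pre_op_name oi → Spec_op_name oi (op_name oi)

-- ===== LEMMAS AND PROOFS =====

-- ===== VERDICT (by name: the statement is the Claim_ definition above) =====
theorem op_name_spec : Claim_equal_op_name := by
  intro oi _ hpre
  unfold Spec_op_name
  by_cases h : oi < 6
  · simp [op_name, op_name_alt, h]
  · have h6 : 6 ≤ oi := not_lt.mp h
    have h36 : oi < 36 := hpre
    interval_cases oi <;> decide
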